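-- pv_equiv track=rewrite | github.com/acidgenomics/koopa | lang/python/src/koopa/generate_completion.py | _emit_platform_block
-- ===== SOURCE A (Python) =====
-- _I = "    "
--
-- def _emit_platform_block(
--     entries: list[tuple[str, str | None]],
--     indent: str,
-- ) -> list[str]:
--     """Emit args+= lines with platform conditionals."""
--     lines: list[str] = []
--     common = sorted(e[0] for e in entries if e[1] is None)
--     linux = sorted(e[0] for e in entries if e[1] == "linux")
--     macos = sorted(e[0] for e in entries if e[1] == "macos")
--     debian = sorted(e[0] for e in entries if e[1] == "debian")
--     fedora = sorted(e[0] for e in entries if e[1] == "fedora")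
--     debian_or_fedora = sorted(e[0] for e in entries if e[1] == "debian_or_fedora")
--     if common:
--         lines.extend(_emit_args_array(common, indent))
--     if linux:
--         lines.append(f"{indent}if _koopa_is_linux")
--         lines.append(f"{indent}then")
--         lines.extend(_emit_args_array(linux, f"{indent}{_I}"))
--         lines.append(f"{indent}fi")
--     if macos:
--         lines.append(f"{indent}if _koopa_is_macos")
--         lines.append(f"{indent}then")
--         lines.extend(_emit_args_array(macos, f"{indent}{_I}"))
--         lines.append(f"{indent}fi")
--     if debian_or_fedora:
--         lines.append(f"{indent}if grep -q 'debian' /etc/os-release 2>/dev/null || \\")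
--         lines.append(f"{indent}   grep -q 'fedora' /etc/os-release 2>/dev/null")
--         lines.append(f"{indent}then")
--         lines.extend(_emit_args_array(debian_or_fedora, f"{indent}{_I}"))
--         lines.append(f"{indent}fi")
--     if debian:
--         lines.append(f"{indent}if grep -q 'debian' /etc/os-release 2>/dev/null")
--         lines.append(f"{indent}then")
--         lines.extend(_emit_args_array(debian, f"{indent}{_I}"))
--         lines.append(f"{indent}fi")
--     if fedora:
--         lines.append(f"{indent}if grep -q 'fedora' /etc/os-release 2>/dev/null")
--         lines.append(f"{indent}then")
--         lines.extend(_emit_args_array(fedora, f"{indent}{_I}"))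
--         lines.append(f"{indent}fi")
--     return lines
--
-- def _emit_args_array(names: list[str], indent: str) -> list[str]:
--     """Emit a shell ``args+=( ... )`` block."""
--     if not names:
--         return []
--     if len(names) == 1:
--         return [f"{indent}args+=('{names[0]}')"]
--     lines = [f"{indent}args+=("]
--     for name in sorted(names):
--         lines.append(f"{indent}{_I}'{name}'")
--     lines.append(f"{indent})")
--     return lines
-- ===== SOURCE B (Python) =====
-- _I = "    "
--
-- _GROUPS = [
--     ("linux", ["if _koopa_is_linux", "then"]),
--     ("macos", ["if _koopa_is_macos", "then"]),
--     ("debian_or_fedora", ["if grep -q 'debian' /etc/os-release 2>/dev/null || \\",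
--                           "   grep -q 'fedora' /etc/os-release 2>/dev/null", "then"]),
--     ("debian", ["if grep -q 'debian' /etc/os-release 2>/dev/null", "then"]),
--     ("fedora", ["if grep -q 'fedora' /etc/os-release 2>/dev/null", "then"]),
-- ]
--
-- def _emit_args_array(names, indent):
--     if not names:
--         return []
--     if len(names) == 1:
--         return [indent + "args+=('" + names[0] + "')"]
--     return ([indent + "args+=("]
--             + [indent + _I + "'" + n + "'" for n in sorted(names)]
--             + [indent + ")"])
--
-- def _emit_platform_block(entries, indent):
--     groups = {}
--     for name, plat in entries:
--         groups.setdefault(plat, []).append(name)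
--     lines = _emit_args_array(sorted(groups.get(None, [])), indent)
--     for key, headers in _GROUPS:
--         names = sorted(groups.get(key, []))
--         if names:
--             lines.extend(indent + h for h in headers)
--             lines.extend(_emit_args_array(names, indent + _I))
--             lines.append(indent + "fi")
--     return lines
-- ===== Notes on version B (the rewrite author's own statement) =====
-- stated objective: idiomatic
-- what changed: B replaces A's six separate filter-comprehensions and five hand-written if/fi blocks by a single grouping pass building a dict platform->names plus a table-driven loop over an ordered (key, header-lines) descriptor list.
import Mathlib
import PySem

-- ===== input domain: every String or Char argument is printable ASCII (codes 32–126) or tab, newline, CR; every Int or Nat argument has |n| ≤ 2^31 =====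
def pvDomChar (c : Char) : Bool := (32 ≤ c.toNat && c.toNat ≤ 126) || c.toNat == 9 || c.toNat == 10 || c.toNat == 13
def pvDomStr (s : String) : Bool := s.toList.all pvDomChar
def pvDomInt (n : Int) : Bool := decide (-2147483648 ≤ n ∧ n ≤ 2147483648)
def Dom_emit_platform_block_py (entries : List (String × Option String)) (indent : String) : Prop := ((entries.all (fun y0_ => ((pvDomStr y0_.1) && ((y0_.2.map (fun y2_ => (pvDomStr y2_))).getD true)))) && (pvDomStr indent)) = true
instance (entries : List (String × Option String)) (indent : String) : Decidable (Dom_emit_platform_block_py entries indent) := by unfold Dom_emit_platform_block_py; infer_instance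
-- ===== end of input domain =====

-- B replaces A's six hand-written filter-and-if blocks by one grouping pass into a dict plus a
-- table-driven emission loop (objective: idiomatic decomposition; no speed claim).

def pvI : String := "    "

-- ===== PORT A =====
-- literal port of _emit_args_array as A calls it
def pvEmitArgsArrayA (names : List String) (indent : String) : List String :=
  if names = [] then []
  else if names.length = 1 then
    [indent ++ "args+=('" ++ ((PySem.List.pyGet? names 0).getD "") ++ "')"]
  else
    ((PySem.List.sorted names (fun x => x) false).foldl
      (fun ls n => ls ++ [indent ++ pvI ++ "'" ++ n ++ "'"])
      [indent ++ "args+=("]) ++ [indent ++ ")"]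

def emit_platform_block_py (entries : List (String × Option String)) (indent : String) : List String :=
  let lines : List String := []
  let common := PySem.List.sorted ((entries.filter (fun e => e.2 == none)).map (fun e => e.1)) (fun x => x) false
  let linux := PySem.List.sorted ((entries.filter (fun e => e.2 == some "linux")).map (fun e => e.1)) (fun x => x) false
  let macos := PySem.List.sorted ((entries.filter (fun e => e.2 == some "macos")).map (fun e => e.1)) (fun x => x) false
  let debian := PySem.List.sorted ((entries.filter (fun e => e.2 == some "debian")).map (fun e => e.1)) (fun x => x) false
  let fedora := PySem.List.sorted ((entries.filter (fun e => e.2 == some "fedora")).map (fun e => e.1)) (fun x => x) false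
  let debian_or_fedora := PySem.List.sorted ((entries.filter (fun e => e.2 == some "debian_or_fedora")).map (fun e => e.1)) (fun x => x) false
  let lines := if common = [] then lines else lines ++ pvEmitArgsArrayA common indent
  let lines := if linux = [] then lines else
    lines ++ [indent ++ "if _koopa_is_linux", indent ++ "then"]
      ++ pvEmitArgsArrayA linux (indent ++ pvI) ++ [indent ++ "fi"]
  let lines := if macos = [] then lines else
    lines ++ [indent ++ "if _koopa_is_macos", indent ++ "then"]
      ++ pvEmitArgsArrayA macos (indent ++ pvI) ++ [indent ++ "fi"]
  let lines := if debian_or_fedora = [] then lines else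
    lines ++ [indent ++ "if grep -q 'debian' /etc/os-release 2>/dev/null || \\",
              indent ++ "   grep -q 'fedora' /etc/os-release 2>/dev/null",
              indent ++ "then"]
      ++ pvEmitArgsArrayA debian_or_fedora (indent ++ pvI) ++ [indent ++ "fi"]
  let lines := if debian = [] then lines else
    lines ++ [indent ++ "if grep -q 'debian' /etc/os-release 2>/dev/null", indent ++ "then"]
      ++ pvEmitArgsArrayA debian (indent ++ pvI) ++ [indent ++ "fi"]
  let lines := if fedora = [] then lines else
    lines ++ [indent ++ "if grep -q 'fedora' /etc/os-release 2>/dev/null", indent ++ "then"]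
      ++ pvEmitArgsArrayA fedora (indent ++ pvI) ++ [indent ++ "fi"]
  lines

-- ===== PORT B =====
-- the ordered conditional-group table _GROUPS of Source B (keys as the dict's Option String keys)
def pvGroupsTable : List (Option String × List String) :=
  [ (some "linux", ["if _koopa_is_linux", "then"]),
    (some "macos", ["if _koopa_is_macos", "then"]),
    (some "debian_or_fedora",
      ["if grep -q 'debian' /etc/os-release 2>/dev/null || \\",
       "   grep -q 'fedora' /etc/os-release 2>/dev/null", "then"]),
    (some "debian", ["if grep -q 'debian' /etc/os-release 2>/dev/null", "then"]),
    (some "fedora", ["if grep -q 'fedora' /etc/os-release 2>/dev/null", "then"]) ]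

-- literal port of Source B's _emit_args_array (list comprehension = map)
def pvEmitArgsArrayB (names : List String) (indent : String) : List String :=
  if names = [] then []
  else if names.length = 1 then [indent ++ "args+=('" ++ names.headD "" ++ "')"]
  else [indent ++ "args+=("]
    ++ (PySem.List.sorted names (fun x => x) false).map (fun n => indent ++ pvI ++ "'" ++ n ++ "'")
    ++ [indent ++ ")"]

def emit_platform_block_py_alt (entries : List (String × Option String)) (indent : String) : List String :=
  let groups : PySem.Dict (Option String) (List String) :=
    entries.foldl (fun d e => d.modify e.2 [] (fun l => l ++ [e.1])) PySem.Dict.empty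
  let lines := pvEmitArgsArrayB (PySem.List.sorted (groups.getD none []) (fun x => x) false) indent
  pvGroupsTable.foldl (fun ls kh =>
    let names := PySem.List.sorted (groups.getD kh.1 []) (fun x => x) false
    if names = [] then ls
    else ls ++ kh.2.map (fun h => indent ++ h)
      ++ pvEmitArgsArrayB names (indent ++ pvI) ++ [indent ++ "fi"]) lines

-- ===== PRECONDITION & SPEC =====
def Spec_emit_platform_block_py (entries : List (String × Option String)) (indent : String) (out : List String) : Prop := out = emit_platform_block_py_alt entries indent
instance (entries : List (String × Option String)) (indent : String) (out : List String) : Decidable (Spec_emit_platform_block_py entries indent out) := by unfold Spec_emit_platform_block_py; infer_instance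

-- ===== CLAIM (what is proved, stated in full; the proofs are below) =====
def Claim_equal_emit_platform_block_py : Prop := ∀ (entries : List (String × Option String)) (indent : String), Dom_emit_platform_block_py entries indent → Spec_emit_platform_block_py entries indent (emit_platform_block_py entries indent)

-- ===== LEMMAS AND PROOFS =====

-- the grouping fold's bucket for key k is exactly A's filtered name list (in entry order)
theorem pv_bucket (entries : List (String × Option String))
    (d : PySem.Dict (Option String) (List String)) (k : Option String) :
    (entries.foldl (fun d e => d.modify e.2 [] (fun l => l ++ [e.1])) d).getD k []
      = d.getD k [] ++ (entries.filter (fun e => e.2 == k)).map (fun e => e.1) := by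
  induction entries generalizing d with
  | nil => simp
  | cons e es ih =>
      simp only [List.foldl_cons, ih, List.filter_cons]
      rw [PySem.Dict.getD_modify]
      by_cases h : e.2 = k
      · simp [h]
      · simp [h, Ne.symm h, beq_iff_eq]

-- Source B's args-array emitter agrees with A's (foldl-append = map, PySem.List.foldl_append_singleton)
theorem pv_args_eq (names : List String) (indent : String) :
    pvEmitArgsArrayA names indent = pvEmitArgsArrayB names indent := by
  unfold pvEmitArgsArrayA pvEmitArgsArrayB
  split_ifs with h1 h2
  · rfl
  · obtain ⟨x, t, rfl⟩ : ∃ x t, names = x :: t := by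
      cases names with
      | nil => exact absurd rfl h1
      | cons x t => exact ⟨x, t, rfl⟩
    cases t with
    | nil => simp [PySem.List.pyGet?, PySem.List.pyIdx?]
    | cons y t => simp at h2
  · rw [PySem.List.foldl_append_singleton_eq_map]

-- a guarded emitB-call: the guard is redundant since pvEmitArgsArrayB [] _ = []
theorem pv_emitB_if (c : List String) (i : String) :
    (if c = [] then ([] : List String) else pvEmitArgsArrayB c i) = pvEmitArgsArrayB c i := by
  by_cases h : c = [] <;> simp [h, pvEmitArgsArrayB]

-- ===== VERDICT (by name: the statement is the Claim_ definition above) =====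
theorem emit_platform_block_py_spec : Claim_equal_emit_platform_block_py := by
  intro entries indent _
  unfold Spec_emit_platform_block_py
  unfold emit_platform_block_py emit_platform_block_py_alt pvGroupsTable
  simp only [List.foldl_cons, List.foldl_nil, pv_bucket, PySem.Dict.getD_empty,
    List.nil_append, List.map_cons, List.map_nil, pv_args_eq, pv_emitB_if]
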